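-- pv_equiv track=rewrite | github.com/takuan-osho/ccmarketplace | plugins/tdl/scripts/trace_status.py | extract_document_type
-- ===== SOURCE A (Python) =====
-- def extract_document_type(filename: str) -> str | None:
--     """Extract document type from filename prefix."""
--     prefixes = {
--         "AN-": "Analysis",
--         "FR-": "Functional Requirement",
--         "NFR-": "Non-Functional Requirement",
--         "ADR-": "ADR",
--         "T-": "Task",
--     }
--     for prefix, doc_type in prefixes.items():
--         if filename.upper().startswith(prefix):
--             return doc_type
--     return None
-- ===== SOURCE B (Python) =====
-- def extract_document_type(filename: str) -> str | None:
--     """Extract document type from filename prefix (single lookup, no scan)."""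
--     prefixes = {
--         "AN-": "Analysis",
--         "FR-": "Functional Requirement",
--         "NFR-": "Non-Functional Requirement",
--         "ADR-": "ADR",
--         "T-": "Task",
--     }
--     head, sep, _ = filename.upper().partition("-")
--     return prefixes.get(head + sep)
-- ===== Notes on version B (the rewrite author's own statement) =====
-- stated objective: simpler
-- what changed: B removes A's loop of startswith tests: it computes the candidate key once (uppercased head up to and including the first dash, via str.partition) and does a single dict lookup.
import Mathlib
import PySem

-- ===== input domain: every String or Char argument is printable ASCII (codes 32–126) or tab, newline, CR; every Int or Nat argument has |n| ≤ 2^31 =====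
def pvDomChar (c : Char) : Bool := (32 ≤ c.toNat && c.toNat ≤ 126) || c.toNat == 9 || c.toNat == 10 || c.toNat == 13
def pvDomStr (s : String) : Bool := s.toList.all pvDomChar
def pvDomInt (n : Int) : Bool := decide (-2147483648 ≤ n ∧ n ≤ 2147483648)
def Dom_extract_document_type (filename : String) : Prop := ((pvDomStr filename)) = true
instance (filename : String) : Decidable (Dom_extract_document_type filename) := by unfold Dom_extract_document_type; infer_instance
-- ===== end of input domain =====

-- B replaces A's loop of startswith tests by computing the candidate key once
-- (the uppercased text up to and including the first dash, via str.partition) and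
-- doing a single dictionary lookup; objective: simpler.

-- ===== PORT A =====
-- A's loop: for prefix, doc_type in prefixes.items(): if filename.upper().startswith(prefix): return doc_type
def edtLoopA (filename : String) : List (String × String) → Option String
  | [] => none
  | (p, t) :: rest =>
      if PySem.Str.startswith (PySem.Str.upper filename) p then some t
      else edtLoopA filename rest

def extract_document_type (filename : String) : Option String :=
  let prefixes : PySem.Dict String String :=
    ⟨[("AN-", "Analysis"), ("FR-", "Functional Requirement"),
      ("NFR-", "Non-Functional Requirement"), ("ADR-", "ADR"), ("T-", "Task")]⟩
  edtLoopA filename prefixes.items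

-- ===== PORT B =====
-- hand port of the head and sep parts of s.partition("-") (the tail part is unused by B):
-- exact for the single-character separator '-': head = the text before the first '-',
-- sep = ['-'] if a '-' occurs in s, [] otherwise.
def edtPartDash : List Char → List Char × List Char
  | [] => ([], [])
  | c :: t =>
      if c = '-' then ([], ['-'])
      else
        let r := edtPartDash t
        (c :: r.1, r.2)

def extract_document_type_alt (filename : String) : Option String :=
  let prefixes : PySem.Dict (List Char) String :=
    ⟨[("AN-".toList, "Analysis"), ("FR-".toList, "Functional Requirement"),
      ("NFR-".toList, "Non-Functional Requirement"), ("ADR-".toList, "ADR"), ("T-".toList, "Task")]⟩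
  let hs := edtPartDash (PySem.Chars.upper filename.toList)
  prefixes.get? (hs.1 ++ hs.2)

-- ===== PRECONDITION & SPEC =====
def Spec_extract_document_type (filename : String) (out : Option String) : Prop := out = extract_document_type_alt filename
instance (filename : String) (out : Option String) : Decidable (Spec_extract_document_type filename out) := by unfold Spec_extract_document_type; infer_instance

-- ===== CLAIM (what is proved, stated in full; the proofs are below) =====
def Claim_equal_extract_document_type : Prop := ∀ (filename : String), Dom_extract_document_type filename → Spec_extract_document_type filename (extract_document_type filename)

-- ===== LEMMAS AND PROOFS =====

-- A's prefix test against a key "p-" (p dash-free) holds exactly when B's partition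
-- key (head ++ sep) equals that key.
theorem edt_key_eq (u p : List Char) (hp : '-' ∉ p) :
    ((edtPartDash u).1 ++ (edtPartDash u).2 = p ++ ['-']) ↔ (p ++ ['-']) <+: u := by
  induction u generalizing p with
  | nil =>
      constructor
      · intro h; exact absurd (congrArg List.length h) (by simp [edtPartDash])
      · intro h; exact absurd (List.prefix_nil.mp h) (by simp)
  | cons c t ih =>
      by_cases hc : c = '-'
      · subst hc
        cases p with
        | nil => simp [edtPartDash]
        | cons q p' =>
            have hq : q ≠ '-' := fun h => hp (by simp [h])
            constructor
            · intro h
              simp [edtPartDash, hq.symm] at h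
            · intro h
              rw [List.cons_append, List.cons_prefix_cons] at h
              exact absurd h.1 hq
      · cases p with
        | nil =>
            constructor
            · intro h
              simp [edtPartDash, hc] at h
            · intro h
              rw [List.nil_append, List.cons_prefix_cons] at h
              exact absurd h.1.symm hc
        | cons q p' =>
            have hp' : '-' ∉ p' := fun h => hp (by simp [h])
            simp only [edtPartDash, if_neg hc, List.cons_append, List.cons_prefix_cons,
              List.cons.injEq]
            constructor
            · rintro ⟨h1, h2⟩
              exact ⟨h1.symm, (ih p' hp').mp h2⟩
            · rintro ⟨h1, h2⟩
              exact ⟨h1.symm, (ih p' hp').mpr h2⟩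

-- Bool form of the same fact, phrased as Python's startswith test.
theorem edt_sw_eq (u p : List Char) (hp : '-' ∉ p) :
    PySem.Chars.startswith u (p ++ ['-'])
      = decide ((edtPartDash u).1 ++ (edtPartDash u).2 = p ++ ['-']) := by
  rcases h : PySem.Chars.startswith u (p ++ ['-']) with _ | _
  · have := (PySem.Chars.startswith_iff u (p ++ ['-'])).not.mp (by simp [h])
    simp [decide_eq_false ((edt_key_eq u p hp).not.mpr this)]
  · have := (PySem.Chars.startswith_iff u (p ++ ['-'])).mp h
    simp [decide_eq_true ((edt_key_eq u p hp).mpr this)]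

-- orient the assoc-list lookup's `==` the same way as A's tests
theorem edt_beq_comm (a b : List Char) : (a == b) = decide (b = a) := by
  by_cases h : b = a
  · subst h; simp
  · simp only [h, decide_false]
    exact beq_eq_false_iff_ne.mpr (fun g => h g.symm)

-- ===== VERDICT (by name: the statement is the Claim_ definition above) =====
theorem extract_document_type_spec : Claim_equal_extract_document_type := by
  intro filename _
  show extract_document_type filename = extract_document_type_alt filename
  have h1 := edt_sw_eq (PySem.Chars.upper filename.toList) ['A', 'N'] (by decide)
  have h2 := edt_sw_eq (PySem.Chars.upper filename.toList) ['F', 'R'] (by decide)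
  have h3 := edt_sw_eq (PySem.Chars.upper filename.toList) ['N', 'F', 'R'] (by decide)
  have h4 := edt_sw_eq (PySem.Chars.upper filename.toList) ['A', 'D', 'R'] (by decide)
  have h5 := edt_sw_eq (PySem.Chars.upper filename.toList) ['T'] (by decide)
  simp only [List.cons_append, List.nil_append] at h1 h2 h3 h4 h5
  unfold extract_document_type extract_document_type_alt
  simp only [edtLoopA, PySem.Str.startswith_eq, PySem.Str.toList_upper,
    show ("AN-" : String).toList = ['A','N','-'] from rfl,
    show ("FR-" : String).toList = ['F','R','-'] from rfl,
    show ("NFR-" : String).toList = ['N','F','R','-'] from rfl,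
    show ("ADR-" : String).toList = ['A','D','R','-'] from rfl,
    show ("T-" : String).toList = ['T','-'] from rfl]
  rw [h1, h2, h3, h4, h5]
  set k := (edtPartDash (PySem.Chars.upper filename.toList)).1
    ++ (edtPartDash (PySem.Chars.upper filename.toList)).2 with hk
  simp only [PySem.Dict.get?, List.find?, edt_beq_comm]
  by_cases e1 : k = ['A','N','-'] <;> by_cases e2 : k = ['F','R','-'] <;>
    by_cases e3 : k = ['N','F','R','-'] <;> by_cases e4 : k = ['A','D','R','-'] <;>
    by_cases e5 : k = ['T','-'] <;> simp_all
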